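-- pv_equiv track=rewrite | github.com/luisrguerra/analise-covid-br-gov-apc | v1.py | filtrar
-- ===== SOURCE A (Python) =====
-- def codigoColuna (nomeColuna):
--     if nomeColuna == "estado":
--        return 0
--     elif nomeColuna == "municipio":
--        return 1
--     elif nomeColuna == "nomeRegiaoSaude":
--        return 2
--     elif nomeColuna == "data":
--        return 3
--     elif nomeColuna == "populacao":
--        return 4
--     elif nomeColuna == "casosAcumulados":
--        return 5
--     elif nomeColuna == "casosNovos":
--        return 6
--     elif nomeColuna == "obitosAcumulado":
--        return 7
--     elif nomeColuna == "obitosNovos":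
--        return 8
--
-- def filtrar(dados,filtro,busca):
--
--     filtroSelecionado = codigoColuna(filtro)
--
--
--
--     linhas = dados
--
--     resultado = []
--
--     contagem = 0 #Contagem da posição
--     for linha in linhas:
--         if (contagem == 0):
--             resultado.append(linha)
--         elif (contagem > 0 and linha[filtroSelecionado] == busca):
--             resultado.append(linha)
--         contagem = contagem + 1 #Próxima posição na contagem
--
--     return resultado
-- ===== SOURCE B (Python) =====
-- def codigoColuna (nomeColuna):
--     if nomeColuna == "estado":
--        return 0
--     elif nomeColuna == "municipio":
--        return 1
--     elif nomeColuna == "nomeRegiaoSaude":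
--        return 2
--     elif nomeColuna == "data":
--        return 3
--     elif nomeColuna == "populacao":
--        return 4
--     elif nomeColuna == "casosAcumulados":
--        return 5
--     elif nomeColuna == "casosNovos":
--        return 6
--     elif nomeColuna == "obitosAcumulado":
--        return 7
--     elif nomeColuna == "obitosNovos":
--        return 8
--
-- def filtrar(dados, filtro, busca):
--     # Group the data rows by their cell in the selected column (a hash index),
--     # then answer the query with a single dictionary lookup.
--     filtroSelecionado = codigoColuna(filtro)
--     pares = [(linha[filtroSelecionado], linha) for linha in dados[1:]]
--     grupos = {}
--     for chave, linha in pares: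
--         grupos.setdefault(chave, []).append(linha)
--     return dados[:1] + grupos.get(busca, [])
-- ===== Notes on version B (the rewrite author's own statement) =====
-- stated objective: alternative
-- what changed: Instead of scanning with a position counter and testing each row against busca, B builds a hash index grouping the non-header rows by their cell in the selected column and answers with one dictionary lookup appended to the sliced-off header.
import Mathlib
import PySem

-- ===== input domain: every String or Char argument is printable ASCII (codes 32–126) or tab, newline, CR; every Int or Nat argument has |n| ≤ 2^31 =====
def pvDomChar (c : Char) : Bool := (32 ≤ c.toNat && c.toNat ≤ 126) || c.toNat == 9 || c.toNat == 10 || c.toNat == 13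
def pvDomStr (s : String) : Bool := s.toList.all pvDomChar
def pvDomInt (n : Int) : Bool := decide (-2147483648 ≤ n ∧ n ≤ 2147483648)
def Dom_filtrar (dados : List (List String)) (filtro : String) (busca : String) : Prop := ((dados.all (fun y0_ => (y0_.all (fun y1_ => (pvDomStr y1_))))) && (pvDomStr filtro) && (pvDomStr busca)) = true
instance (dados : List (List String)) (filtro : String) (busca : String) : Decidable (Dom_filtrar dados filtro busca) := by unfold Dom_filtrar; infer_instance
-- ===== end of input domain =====

-- B replaces A's counter-driven scan-and-test with a hash index: it groups the non-header
-- rows by their cell in the selected column and answers with one dictionary lookup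
-- (objective: alternative algorithm, same O(n) cost).

-- ===== PORT A =====
-- shared module helper codigoColuna (returns None on an unknown column name)
def codigoColunaPort (nomeColuna : String) : Option Int :=
  if nomeColuna = "estado" then some 0
  else if nomeColuna = "municipio" then some 1
  else if nomeColuna = "nomeRegiaoSaude" then some 2
  else if nomeColuna = "data" then some 3
  else if nomeColuna = "populacao" then some 4
  else if nomeColuna = "casosAcumulados" then some 5
  else if nomeColuna = "casosNovos" then some 6
  else if nomeColuna = "obitosAcumulado" then some 7
  else if nomeColuna = "obitosNovos" then some 8
  else none

-- linha[filtroSelecionado]: none = IndexError, or TypeError when codigoColuna returned None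
def celula (filtro : String) (linha : List String) : Option String :=
  match codigoColunaPort filtro with
  | some i => PySem.List.pyGet? linha i
  | none => none

def filtrar (dados : List (List String)) (filtro : String) (busca : String) : List (List String) :=
  -- for linha in linhas: counter + header branch + filter branch
  (dados.foldl (fun (acc : List (List String) × Int) linha =>
      let resultado :=
        if acc.2 = 0 then acc.1 ++ [linha]
        else if acc.2 > 0 ∧ celula filtro linha = some busca then acc.1 ++ [linha]
        else acc.1
      (resultado, acc.2 + 1)) ([], 0)).1

-- ===== PORT B =====
def filtrar_alt (dados : List (List String)) (filtro : String) (busca : String) : List (List String) :=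
  -- pares = [(linha[filtroSelecionado], linha) for linha in dados[1:]]
  let pares := (PySem.List.slice dados (some 1) none).map (fun linha => (celula filtro linha, linha))
  -- grupos: dict built by setdefault(chave, []).append(linha)
  let grupos := pares.foldl
    (fun (d : PySem.Dict (Option String) (List (List String))) p =>
      d.modify p.1 [] (· ++ [p.2])) PySem.Dict.empty
  PySem.List.slice dados none (some 1) ++ grupos.getD (some busca) []

-- ===== PRECONDITION & SPEC =====
-- Pre_ excludes exactly the inputs where Python A raises: a row after the header indexed with
-- None (unknown column name, TypeError) or with an index past its length (IndexError).
def Pre_filtrar (dados : List (List String)) (filtro : String) (_busca : String) : Prop :=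
  ∀ linha ∈ dados.tail, ∃ i ∈ (codigoColunaPort filtro).toList, i < (linha.length : Int)
instance (dados : List (List String)) (filtro : String) (busca : String) : Decidable (Pre_filtrar dados filtro busca) := by unfold Pre_filtrar; infer_instance

def pvWitness_filtrar : List (List String) × String × String :=
  ([["estado", "casos"], ["SP", "10"], ["RJ", "7"], ["SP", "3"]], "estado", "SP")

def Spec_filtrar (dados : List (List String)) (filtro : String) (busca : String) (out : List (List String)) : Prop := out = filtrar_alt dados filtro busca
instance (dados : List (List String)) (filtro : String) (busca : String) (out : List (List String)) : Decidable (Spec_filtrar dados filtro busca out) := by unfold Spec_filtrar; infer_instance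

-- ===== CLAIM =====
def Claim_equal_filtrar : Prop := ∀ (dados : List (List String)) (filtro : String) (busca : String), Dom_filtrar dados filtro busca → Pre_filtrar dados filtro busca → Spec_filtrar dados filtro busca (filtrar dados filtro busca)

-- ===== LEMMAS AND PROOFS =====

-- A's loop after the header row: with the counter already positive, the fold appends exactly
-- the rows satisfying the cell test, i.e. it is a filter.
lemma filtrar_loop (filtro busca : String) :
    ∀ (t : List (List String)) (res : List (List String)) (c : Int), 0 < c →
    (t.foldl (fun (acc : List (List String) × Int) linha =>
      let resultado :=
        if acc.2 = 0 then acc.1 ++ [linha]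
        else if acc.2 > 0 ∧ celula filtro linha = some busca then acc.1 ++ [linha]
        else acc.1
      (resultado, acc.2 + 1)) (res, c)).1
    = res ++ t.filter (fun linha => celula filtro linha == some busca) := by
  intro t
  induction t with
  | nil => intro res c hc; simp
  | cons h t ih =>
    intro res c hc
    simp only [List.foldl_cons, List.filter_cons]
    have hne : ¬ c = 0 := by omega
    by_cases hm : celula filtro h = some busca
    · simp only [hne, if_false, hm, and_true, hc, if_true]
      rw [ih (res ++ [h]) (c + 1) (by omega)]
      simp
    · simp only [hne, if_false]
      rw [if_neg (by exact fun hh => hm hh.2)]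
      rw [ih res (c + 1) (by omega)]
      simp [hm]

-- B's grouping dict, looked up at busca, is exactly the filter of the tail.
lemma filtrar_alt_group (filtro busca : String) (t : List (List String)) :
    ((t.map (fun linha => (celula filtro linha, linha))).foldl
      (fun (d : PySem.Dict (Option String) (List (List String))) p =>
        d.modify p.1 [] (· ++ [p.2])) PySem.Dict.empty).getD (some busca) []
    = t.filter (fun linha => celula filtro linha == some busca) := by
  rw [PySem.Dict.getD_foldl_modify_append]
  simp [PySem.Dict.getD_empty, List.filter_map, Function.comp_def]

-- ===== VERDICT =====
theorem filtrar_spec : Claim_equal_filtrar := by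
  intro dados filtro busca _ _
  unfold Spec_filtrar filtrar filtrar_alt
  cases dados with
  | nil => simp [PySem.List.slice]
  | cons h t =>
    simp only [List.foldl_cons, if_true, List.nil_append]
    rw [show (0 : Int) + 1 = 1 by norm_num]
    rw [filtrar_loop filtro busca t [h] 1 (by norm_num)]
    rw [filtrar_alt_group]
    have h1 : PySem.List.slice (h :: t) none (some 1) = [h] := by
      simp [PySem.List.slice_to]
    have h2 : PySem.List.slice (h :: t) (some 1) none = t := by
      simp [PySem.List.slice_from]
    rw [h1, h2]
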